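-- pv_equiv track=rewrite | github.com/ProjectMI/MBCdecompiler | mbcdisasm/ir/normalizer.py | _cluster_string_candidates
-- ===== SOURCE A (Python) =====
-- from typing import Any, Dict, Iterator, List, Optional, Sequence, Set, Tuple, Union, cast
--
-- _HUMAN_STRING_CLUSTER_GAP = 256
--
-- def _cluster_string_candidates(
--     entries: Sequence[Tuple[int, str]]
-- ) -> List[List[Tuple[int, str]]]:
--     if not entries:
--         return []
--
--     clusters: List[List[Tuple[int, str]]] = []
--     current: List[Tuple[int, str]] = [entries[0]]
--
--     for offset, text in entries[1:]:
--         if offset - current[-1][0] <= _HUMAN_STRING_CLUSTER_GAP: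
--             current.append((offset, text))
--             continue
--         clusters.append(current)
--         current = [(offset, text)]
--
--     clusters.append(current)
--     return clusters
-- ===== SOURCE B (Python) =====
-- _HUMAN_STRING_CLUSTER_GAP = 256
--
-- def _cluster_string_candidates(entries):
--     result = []
--     i, n = 0, len(entries)
--     while i < n:
--         j = i + 1
--         while j < n and entries[j][0] - entries[j - 1][0] <= _HUMAN_STRING_CLUSTER_GAP:
--             j += 1
--         result.append(list(entries[i:j]))
--         i = j
--     return result
-- ===== Notes on version B (the rewrite author's own statement) =====
-- stated objective: alternative
-- what changed: B replaces A's single fold with a running 'current' cluster and accumulator appends by a two-level span-and-slice decomposition: for each cluster it advances an inner index while the gap stays within the threshold, then emits the slice entries[i:j] at once.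
import Mathlib
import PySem

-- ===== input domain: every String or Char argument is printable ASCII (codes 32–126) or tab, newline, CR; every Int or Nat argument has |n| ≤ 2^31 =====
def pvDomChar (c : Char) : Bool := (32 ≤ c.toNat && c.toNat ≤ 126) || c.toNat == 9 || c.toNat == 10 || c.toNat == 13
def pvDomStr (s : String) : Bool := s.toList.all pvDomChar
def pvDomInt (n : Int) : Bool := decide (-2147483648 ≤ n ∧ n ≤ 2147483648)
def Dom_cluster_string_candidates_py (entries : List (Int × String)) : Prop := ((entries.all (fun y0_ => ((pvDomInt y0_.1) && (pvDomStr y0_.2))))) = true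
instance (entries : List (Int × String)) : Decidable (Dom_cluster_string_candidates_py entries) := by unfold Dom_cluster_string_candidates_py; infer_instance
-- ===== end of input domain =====

-- B replaces A's fold-with-accumulator by a span-and-slice decomposition (no speed claim; same O(n) cost).


-- ===== PORT A =====
-- A's loop over entries[1:], carrying `current` (always nonempty) and `clusters`.
-- current[-1] is ported as getLastD (current is never empty along the loop).
def clusterLoopA (current : List (Int × String)) (clusters : List (List (Int × String))) :
    List (Int × String) → List (List (Int × String))
  | [] => clusters ++ [current]
  | (o, t) :: rs =>
    if o - (current.getLastD ((0 : Int), "")).1 ≤ 256 then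
      clusterLoopA (current ++ [(o, t)]) clusters rs
    else
      clusterLoopA [(o, t)] (clusters ++ [current]) rs

def cluster_string_candidates_py (entries : List (Int × String)) : List (List (Int × String)) :=
  match entries with
  | [] => []
  | e :: rest => clusterLoopA [e] [] rest

-- ===== PORT B =====
-- B's inner while loop: from previous offset p, take the span of entries within the gap.
def spanB (p : Int) : List (Int × String) → List (Int × String) × List (Int × String)
  | [] => ([], [])
  | (o, t) :: rs =>
    if o - p ≤ 256 then
      let c := spanB o rs
      ((o, t) :: c.1, c.2)
    else ([], (o, t) :: rs)

theorem spanB_snd_length (p : Int) (l : List (Int × String)) : (spanB p l).2.length ≤ l.length := by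
  induction l generalizing p with
  | nil => simp [spanB]
  | cons x rs ih =>
    obtain ⟨o, t⟩ := x
    simp only [spanB]
    split
    · exact Nat.le_succ_of_le (ih o)
    · simp

-- B's outer while loop: emit one cluster (head plus its span) per iteration.
def cluster_string_candidates_py_alt (entries : List (Int × String)) : List (List (Int × String)) :=
  match entries with
  | [] => []
  | e :: rest =>
    let c := spanB e.1 rest
    (e :: c.1) :: cluster_string_candidates_py_alt c.2
  termination_by entries.length
  decreasing_by
    exact Nat.lt_succ_of_le (spanB_snd_length e.1 rest)

-- ===== PRECONDITION & SPEC =====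
def Spec_cluster_string_candidates_py (entries : List (Int × String)) (out : List (List (Int × String))) : Prop := out = cluster_string_candidates_py_alt entries
instance (entries : List (Int × String)) (out : List (List (Int × String))) : Decidable (Spec_cluster_string_candidates_py entries out) := by unfold Spec_cluster_string_candidates_py; infer_instance

-- ===== CLAIM (what is proved, stated in full; the proofs are below) =====
def Claim_equal_cluster_string_candidates_py : Prop := ∀ (entries : List (Int × String)), Dom_cluster_string_candidates_py entries → Spec_cluster_string_candidates_py entries (cluster_string_candidates_py entries)

-- ===== LEMMAS AND PROOFS =====

-- The accumulator of A's loop just prefixes the result.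
theorem clusterLoopA_acc (rest : List (Int × String)) (current : List (Int × String))
    (clusters : List (List (Int × String))) :
    clusterLoopA current clusters rest = clusters ++ clusterLoopA current [] rest := by
  induction rest generalizing current clusters with
  | nil => simp [clusterLoopA]
  | cons x rs ih =>
    obtain ⟨o, t⟩ := x
    simp only [clusterLoopA]
    split
    · rw [ih, ih]
    · rw [ih _ (clusters ++ [current]), ih _ ([] ++ [current])]
      simp

-- A's loop from a nonempty `current` equals: finish current with the span, then B's recursion.
theorem clusterLoopA_eq_span (rest : List (Int × String)) (current : List (Int × String))
    (h : current ≠ []) :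
    clusterLoopA current [] rest =
      (current ++ (spanB (current.getLastD ((0 : Int), "")).1 rest).1) ::
        cluster_string_candidates_py_alt (spanB (current.getLastD ((0 : Int), "")).1 rest).2 := by
  induction rest generalizing current with
  | nil => simp [clusterLoopA, spanB, cluster_string_candidates_py_alt]
  | cons x rs ih =>
    obtain ⟨o, t⟩ := x
    simp only [clusterLoopA, spanB]
    split
    · rw [ih (current ++ [(o, t)]) (by simp)]
      simp
    · rw [clusterLoopA_acc, ih [(o, t)] (by simp)]
      conv_rhs => rw [cluster_string_candidates_py_alt]
      simp

-- ===== VERDICT (by name: the statement is the Claim_ definition above) =====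
theorem cluster_string_candidates_py_spec : Claim_equal_cluster_string_candidates_py := by
  intro entries _
  unfold Spec_cluster_string_candidates_py
  match entries with
  | [] => simp [cluster_string_candidates_py, cluster_string_candidates_py_alt]
  | e :: rest =>
    rw [cluster_string_candidates_py, clusterLoopA_eq_span rest [e] (by simp),
      cluster_string_candidates_py_alt]
    simp
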